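-- pv_equiv track=rewrite | github.com/leovanbon/TRR_Project | common/problem.py | reduce_res_tree
-- ===== SOURCE A (Python) =====
-- def reduce_res_tree(res_tree: list):
--     # Res step format: ((c1, c2), c_res_idx, c_res)
--     # Search from the end
--     c_res = [r[2] for r in res_tree]
--     try: falsum_idx = c_res.index(())
--     except ValueError: return res_tree
--
--     res_tree = res_tree[:falsum_idx+1]
--     label = {}
--     for r in res_tree:
--         p = r[0]
--         label[p[0]] = label[p[1]] = 0
--         label[r[1]] = 0
--     label[res_tree[-1][1]] = 1
--     for r in reversed(res_tree):
--         p = r[0]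
--         label[p[0]] += label[r[1]]
--         label[p[1]] += label[r[1]]
--     red_tree = [r for r in res_tree if label[r[1]] > 0]
--     return red_tree
-- ===== SOURCE B (Python) =====
-- def reduce_res_tree(res_tree: list):
--     for i, r in enumerate(res_tree):
--         if r[2] == ():
--             tree = res_tree[:i + 1]
--             parents = {}
--             for s in tree:
--                 parents[s[1]] = s[0]
--             used = set()
--             frontier = [r[1]]
--             while frontier:
--                 x = frontier.pop()
--                 if x not in used:
--                     used.add(x)
--                     if x in parents:
--                         frontier.extend(parents[x])
--             return [s for s in tree if s[1] in used]
--     return res_tree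
-- ===== Notes on version B (the rewrite author's own statement) =====
-- stated objective: alternative
-- what changed: Replaces A's integer path-count labelling (a zero-initialisation pass over all indices followed by an unguarded counted reverse pass and a positivity filter) by explicit graph reachability: build a result-index-to-parent-pair map once, run a worklist walk from the falsum's result index collecting a used set, and keep the steps whose result index was reached; the falsum search and truncation become a single forward scan.
import Mathlib
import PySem

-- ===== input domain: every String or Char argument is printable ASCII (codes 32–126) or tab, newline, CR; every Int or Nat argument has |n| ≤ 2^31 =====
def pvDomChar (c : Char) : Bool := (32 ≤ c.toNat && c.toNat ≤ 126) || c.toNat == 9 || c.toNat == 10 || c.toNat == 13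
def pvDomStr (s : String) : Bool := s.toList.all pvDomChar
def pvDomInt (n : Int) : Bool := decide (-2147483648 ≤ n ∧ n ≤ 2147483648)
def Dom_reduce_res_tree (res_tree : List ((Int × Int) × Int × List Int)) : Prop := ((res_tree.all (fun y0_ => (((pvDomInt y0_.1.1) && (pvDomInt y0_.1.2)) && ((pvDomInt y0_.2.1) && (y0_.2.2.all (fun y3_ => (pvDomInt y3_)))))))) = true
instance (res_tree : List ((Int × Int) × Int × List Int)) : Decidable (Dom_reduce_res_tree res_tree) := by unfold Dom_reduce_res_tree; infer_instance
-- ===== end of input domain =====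

-- B replaces A's integer path-count labelling (init pass + counted reverse pass over the steps)
-- by explicit graph reachability: a parent map and a worklist walk from the falsum's result index.
-- Equal on Pre_ (well-formed proof trees); alternative algorithm, same asymptotic cost.

-- ===== PORT A =====
-- A step is ((c1, c2), c_res_idx, c_res): parent clause indices, result index, result clause.
def reduce_res_tree (res_tree : List ((Int × Int) × Int × List Int)) : List ((Int × Int) × Int × List Int) :=
  let c_res := res_tree.map (fun r => r.2.2)
  match PySem.List.index? c_res ([] : List Int) with
  | none => res_tree                                 -- except ValueError: return res_tree
  | some falsum_idx =>
    let t := PySem.List.slice res_tree none (some ((falsum_idx : Int) + 1))  -- res_tree[:falsum_idx+1]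
    -- label[p[0]] = label[p[1]] = 0; label[r[1]] = 0
    let label0 : PySem.Dict Int Int :=
      t.foldl (fun d r => ((d.insert r.1.1 0).insert r.1.2 0).insert r.2.1 0) PySem.Dict.empty
    -- label[res_tree[-1][1]] = 1  (t is nonempty here, so pyGetD's fallback is never used)
    let label1 := label0.insert (PySem.List.pyGetD t (-1) (((0, 0), 0, []) : (Int × Int) × Int × List Int)).2.1 1
    -- for r in reversed(res_tree): label[p[0]] += label[r[1]]; label[p[1]] += label[r[1]]
    -- (every key read below was initialized by the first loop, so getD with default 0 is exact)
    let label2 := t.reverse.foldl (fun (d : PySem.Dict Int Int) r =>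
      let d1 := d.insert r.1.1 (d.getD r.1.1 0 + d.getD r.2.1 0)
      d1.insert r.1.2 (d1.getD r.1.2 0 + d1.getD r.2.1 0)) label1
    t.filter (fun r => decide (0 < label2.getD r.2.1 0))

-- ===== PORT B =====
-- parents = {}; for s in tree: parents[s[1]] = s[0]
def buildParents (t : List ((Int × Int) × Int × List Int)) : PySem.Dict Int (Int × Int) :=
  t.foldl (fun d s => d.insert s.2.1 s.1) PySem.Dict.empty

-- two small facts the worklist loop cites for termination (proof helpers for the port itself)
theorem pv_contains_add_of_ne {s : PySem.Set Int} {x k : Int} (h : k ≠ x) :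
    PySem.Set.contains (PySem.Set.add s x) k = PySem.Set.contains s k := by
  cases hb : PySem.Set.contains s k with
  | true => exact (PySem.Set.contains_iff _ _).mpr (by
      rw [PySem.Set.mem_add]; exact Or.inl ((PySem.Set.contains_iff _ _).mp hb))
  | false =>
    cases hc : PySem.Set.contains (PySem.Set.add s x) k with
    | false => rfl
    | true =>
      exfalso
      have := (PySem.Set.contains_iff _ _).mp hc
      rw [PySem.Set.mem_add] at this
      rcases this with h1 | h1
      · rw [(PySem.Set.contains_iff _ _).mpr h1] at hb; cases hb
      · exact h h1

theorem pv_filter_length_mono (l : List Int) (p q : Int → Bool) (h : ∀ k, q k = true → p k = true) :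
    (l.filter q).length ≤ (l.filter p).length := by
  induction l with
  | nil => simp
  | cons a l ih =>
    simp only [List.filter_cons]
    cases hq : q a with
    | true => rw [h a hq]; simpa using ih
    | false => cases p a <;> simp <;> omega

theorem pv_filter_length_lt {keys : List Int} {used : PySem.Set Int} {x : Int}
    (hk : x ∈ keys) (hx : PySem.Set.contains used x = false) :
    (keys.filter (fun k => !PySem.Set.contains (PySem.Set.add used x) k)).length <
      (keys.filter (fun k => !PySem.Set.contains used k)).length := by
  have hmono : ∀ (l : List Int), (l.filter (fun k => !PySem.Set.contains (PySem.Set.add used x) k)).length ≤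
      (l.filter (fun k => !PySem.Set.contains used k)).length := by
    intro l
    apply pv_filter_length_mono
    intro k hq
    by_cases hkx : k = x
    · subst hkx
      exfalso
      have h1 : PySem.Set.contains (PySem.Set.add used k) k = true :=
        (PySem.Set.contains_iff _ _).mpr (by rw [PySem.Set.mem_add]; exact Or.inr rfl)
      rw [h1] at hq; cases hq
    · rwa [pv_contains_add_of_ne hkx] at hq
  obtain ⟨l1, l2, rfl⟩ := List.append_of_mem hk
  have h1 : PySem.Set.contains (PySem.Set.add used x) x = true :=
    (PySem.Set.contains_iff _ _).mpr (by rw [PySem.Set.mem_add]; exact Or.inr rfl)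
  simp only [List.filter_append, List.filter_cons, h1, hx, Bool.not_true, Bool.not_false,
    List.length_append, Bool.false_eq_true, if_false, if_true, List.length_cons]
  have := hmono l1
  have := hmono l2
  omega

-- used = set(); frontier = [r[1]]; while frontier: pop/mark/push parents.
-- The Lean list models Python's stack with the HEAD as Python's list end (pop()/append there);
-- extend((p0, p1)) pushes p0 then p1, so p1 ends on top.
def bfsLoop (m : PySem.Dict Int (Int × Int)) (used : PySem.Set Int) (frontier : List Int) :
    PySem.Set Int :=
  match frontier with
  | [] => used
  | x :: rest =>
    if hx : PySem.Set.contains used x = true then bfsLoop m used rest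
    else
      match hm : m.get? x with
      | some p => bfsLoop m (PySem.Set.add used x) (p.2 :: p.1 :: rest)
      | none => bfsLoop m (PySem.Set.add used x) rest
termination_by ((m.keys.filter (fun k => !PySem.Set.contains used k)).length, frontier.length)
decreasing_by
  · apply Prod.Lex.right; simp
  · apply Prod.Lex.left
    apply pv_filter_length_lt _ (by simpa using hx)
    have : ¬ (m.get? x = none) := by simp [hm]
    rw [PySem.Dict.get?_eq_none_iff_not_mem_keys] at this
    simpa using this
  · have hxk : x ∉ m.keys := by
      rw [← PySem.Dict.get?_eq_none_iff_not_mem_keys]; exact hm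
    have heq : m.keys.filter (fun k => !PySem.Set.contains (PySem.Set.add used x) k) =
        m.keys.filter (fun k => !PySem.Set.contains used k) := by
      apply List.filter_congr
      intro k hkm
      rw [pv_contains_add_of_ne (show k ≠ x from fun h => hxk (by rwa [h] at hkm))]
    rw [heq]
    apply Prod.Lex.right; simp

-- the 'for i, r in enumerate(res_tree): if r[2] == (): …' loop; acc holds the scanned prefix reversed
def scanB (acc : List ((Int × Int) × Int × List Int)) :
    List ((Int × Int) × Int × List Int) → List ((Int × Int) × Int × List Int)
  | [] => acc.reverse
  | r :: rest =>
    if r.2.2 = ([] : List Int) then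
      let tree := (r :: acc).reverse                 -- res_tree[:i+1]
      let used := bfsLoop (buildParents tree) PySem.Set.empty [r.2.1]
      tree.filter (fun s => PySem.Set.contains used s.2.1)
    else scanB (r :: acc) rest

def reduce_res_tree_alt (res_tree : List ((Int × Int) × Int × List Int)) :
    List ((Int × Int) × Int × List Int) :=
  scanB [] res_tree

-- ===== PRECONDITION & SPEC =====
-- Pre_ excludes ill-formed proof trees (within the prefix ending at the first falsum: a repeated
-- result index, or a step whose parent index equals the result index of a LATER step); there A's
-- positional reverse pass and B's declarative reachability are both defensible and can differ.
def Pre_reduce_res_tree (res_tree : List ((Int × Int) × Int × List Int)) : Prop :=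
  (res_tree.takeWhile (fun r => !r.2.2.isEmpty)).length < res_tree.length →
    (((res_tree.take ((res_tree.takeWhile (fun r => !r.2.2.isEmpty)).length + 1)).map
        (fun s => s.2.1)).Nodup ∧
      (res_tree.take ((res_tree.takeWhile (fun r => !r.2.2.isEmpty)).length + 1)).Pairwise
        (fun a b => a.1.1 ≠ b.2.1 ∧ a.1.2 ≠ b.2.1))
instance (res_tree : List ((Int × Int) × Int × List Int)) : Decidable (Pre_reduce_res_tree res_tree) := by
  unfold Pre_reduce_res_tree; infer_instance

def pvWitness_reduce_res_tree : (List ((Int × Int) × Int × List Int)) := [((1, 2), 3, [])]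

def Spec_reduce_res_tree (res_tree : List ((Int × Int) × Int × List Int)) (out : List ((Int × Int) × Int × List Int)) : Prop := out = reduce_res_tree_alt res_tree
instance (res_tree : List ((Int × Int) × Int × List Int)) (out : List ((Int × Int) × Int × List Int)) : Decidable (Spec_reduce_res_tree res_tree out) := by unfold Spec_reduce_res_tree; infer_instance

-- ===== CLAIM =====
def Claim_equal_reduce_res_tree : Prop := ∀ (res_tree : List ((Int × Int) × Int × List Int)), Dom_reduce_res_tree res_tree → Pre_reduce_res_tree res_tree → Spec_reduce_res_tree res_tree (reduce_res_tree res_tree)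


-- ===== LEMMAS AND PROOFS =====

-- the three step functions of the two loops, named for the proofs
def initStep (d : PySem.Dict Int Int) (r : (Int × Int) × Int × List Int) : PySem.Dict Int Int :=
  ((d.insert r.1.1 0).insert r.1.2 0).insert r.2.1 0

def aStep (d : PySem.Dict Int Int) (r : (Int × Int) × Int × List Int) : PySem.Dict Int Int :=
  let d1 := d.insert r.1.1 (d.getD r.1.1 0 + d.getD r.2.1 0)
  d1.insert r.1.2 (d1.getD r.1.2 0 + d1.getD r.2.1 0)

def bStep (u : PySem.Set Int) (s : (Int × Int) × Int × List Int) : PySem.Set Int :=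
  if PySem.Set.contains u s.2.1 then PySem.Set.add (PySem.Set.add u s.1.1) s.1.2 else u

theorem getD_initStep_foldl (t : List ((Int × Int) × Int × List Int)) (d : PySem.Dict Int Int)
    (hd : ∀ k, d.getD k 0 = 0) : ∀ k, (t.foldl initStep d).getD k 0 = 0 := by
  induction t generalizing d with
  | nil => exact hd
  | cons x xs ih =>
    refine ih _ (fun k => ?_)
    unfold initStep
    by_cases h1 : k = x.2.1
    · subst h1; rw [PySem.Dict.getD_insert_self]
    · rw [PySem.Dict.getD_insert_of_ne _ _ _ h1]
      by_cases h2 : k = x.1.2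
      · subst h2; rw [PySem.Dict.getD_insert_self]
      · rw [PySem.Dict.getD_insert_of_ne _ _ _ h2]
        by_cases h3 : k = x.1.1
        · subst h3; rw [PySem.Dict.getD_insert_self]
        · rw [PySem.Dict.getD_insert_of_ne _ _ _ h3]; exact hd k

theorem step_inv (d : PySem.Dict Int Int) (u : PySem.Set Int) (r : (Int × Int) × Int × List Int)
    (hd : ∀ k, 0 ≤ d.getD k 0)
    (hiff : ∀ k, 0 < d.getD k 0 ↔ PySem.Set.contains u k = true) :
    (∀ k, 0 ≤ (aStep d r).getD k 0) ∧
      (∀ k, 0 < (aStep d r).getD k 0 ↔ PySem.Set.contains (bStep u r) k = true) := by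
  obtain ⟨⟨p0, p1⟩, r1, cl⟩ := r
  have g2 : ∀ k, (aStep d ((p0, p1), r1, cl)).getD k 0 =
      if k = p1 then
        (d.insert p0 (d.getD p0 0 + d.getD r1 0)).getD p1 0 +
          (d.insert p0 (d.getD p0 0 + d.getD r1 0)).getD r1 0
      else (d.insert p0 (d.getD p0 0 + d.getD r1 0)).getD k 0 := by
    intro k
    show ((d.insert p0 (d.getD p0 0 + d.getD r1 0)).insert p1
        ((d.insert p0 (d.getD p0 0 + d.getD r1 0)).getD p1 0 +
          (d.insert p0 (d.getD p0 0 + d.getD r1 0)).getD r1 0)).getD k 0 = _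
    by_cases hk : k = p1
    · subst hk; rw [PySem.Dict.getD_insert_self, if_pos rfl]
    · rw [PySem.Dict.getD_insert_of_ne _ _ _ hk, if_neg hk]
  have g1 : ∀ k, (d.insert p0 (d.getD p0 0 + d.getD r1 0)).getD k 0 =
      if k = p0 then d.getD p0 0 + d.getD r1 0 else d.getD k 0 := by
    intro k
    by_cases hk : k = p0
    · subst hk; rw [PySem.Dict.getD_insert_self, if_pos rfl]
    · rw [PySem.Dict.getD_insert_of_ne _ _ _ hk, if_neg hk]
  have hmem : ∀ k, PySem.Set.contains (bStep u ((p0, p1), r1, cl)) k = true ↔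
      (0 < d.getD k 0 ∨ (0 < d.getD r1 0 ∧ (k = p0 ∨ k = p1))) := by
    intro k
    unfold bStep
    by_cases hc : PySem.Set.contains u r1 = true
    · have hv : 0 < d.getD r1 0 := (hiff r1).mpr hc
      simp only [hc, if_true, PySem.Set.contains_iff, PySem.Set.mem_add]
      rw [← PySem.Set.contains_iff, ← hiff k]
      tauto
    · have hv : ¬ 0 < d.getD r1 0 := fun h => hc ((hiff r1).mp h)
      simp only [hc]
      rw [hiff k]
      tauto
  constructor
  · intro k
    rw [g2, g1, g1, g1]
    have := hd k; have := hd p0; have := hd p1; have := hd r1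
    split_ifs <;> subst_vars <;> omega
  · intro k
    rw [g2, g1, g1, g1, hmem k]
    have := hd k; have := hd p0; have := hd p1; have := hd r1
    split_ifs <;> subst_vars <;> omega

theorem aStep_bStep_inv (rs : List ((Int × Int) × Int × List Int)) (d : PySem.Dict Int Int)
    (u : PySem.Set Int) (hd : ∀ k, 0 ≤ d.getD k 0)
    (hiff : ∀ k, 0 < d.getD k 0 ↔ PySem.Set.contains u k = true) :
    (∀ k, 0 ≤ (rs.foldl aStep d).getD k 0) ∧
      (∀ k, 0 < (rs.foldl aStep d).getD k 0 ↔ PySem.Set.contains (rs.foldl bStep u) k = true) := by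
  induction rs generalizing d u with
  | nil => exact ⟨hd, hiff⟩
  | cons r rs ih =>
    obtain ⟨h1, h2⟩ := step_inv d u r hd hiff
    exact ih _ _ h1 h2

-- A's filtered list is the filter by the reverse-pass reachable set
theorem core_eq (t : List ((Int × Int) × Int × List Int)) (seed : Int) :
    t.filter (fun r => decide (0 <
        (t.reverse.foldl aStep ((t.foldl initStep PySem.Dict.empty).insert seed 1)).getD r.2.1 0)) =
      t.filter (fun r => PySem.Set.contains (t.reverse.foldl bStep (PySem.Set.ofList [seed])) r.2.1) := by
  have h0 : ∀ k, ((t.foldl initStep PySem.Dict.empty).insert seed 1).getD k 0 =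
      if k = seed then 1 else 0 := by
    intro k
    by_cases hk : k = seed
    · subst hk; rw [PySem.Dict.getD_insert_self, if_pos rfl]
    · rw [PySem.Dict.getD_insert_of_ne _ _ _ hk, if_neg hk,
        getD_initStep_foldl t _ (fun k => PySem.Dict.getD_empty k 0)]
  have hinv := aStep_bStep_inv t.reverse _ (PySem.Set.ofList [seed])
    (by intro k; rw [h0]; split_ifs <;> omega)
    (by
      intro k
      rw [h0, PySem.Set.contains_iff, PySem.Set.mem_ofList]
      constructor
      · intro hk; split_ifs at hk with h
        · simp [h]
        · omega
      · intro hk; simp only [List.mem_singleton] at hk; simp [hk])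
  apply List.filter_congr
  intro x hx
  have hiff := hinv.2 x.2.1
  cases hb : PySem.Set.contains (t.reverse.foldl bStep (PySem.Set.ofList [seed])) x.2.1 with
  | true => exact decide_eq_true (hiff.mpr hb)
  | false => exact decide_eq_false (fun hlt => by cases (hiff.mp hlt).symm.trans hb)

-- ---- reachability from the seed through the parent map ----
theorem pv_contains_eq_false {s : PySem.Set Int} {y : Int} (h : y ∉ s) :
    PySem.Set.contains s y = false := by
  cases hc : PySem.Set.contains s y with
  | false => rfl
  | true => exact absurd ((PySem.Set.contains_iff _ _).mp hc) h

inductive Cl (m : PySem.Dict Int (Int × Int)) (seed : Int) : Int → Prop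
  | base : Cl m seed seed
  | left : ∀ {x : Int} {p : Int × Int}, Cl m seed x → m.get? x = some p → Cl m seed p.1
  | right : ∀ {x : Int} {p : Int × Int}, Cl m seed x → m.get? x = some p → Cl m seed p.2

theorem bfs_superset (m : PySem.Dict Int (Int × Int)) (used0 : PySem.Set Int) (frontier0 : List Int) :
    ∀ y, (y ∈ used0 ∨ y ∈ frontier0) → y ∈ bfsLoop m used0 frontier0 := by
  refine bfsLoop.induct m
    (fun used frontier => ∀ y, (y ∈ used ∨ y ∈ frontier) → y ∈ bfsLoop m used frontier)
    ?_ ?_ ?_ ?_ used0 frontier0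
  · intro used y hy; rw [bfsLoop]; rcases hy with h | h; exact h; cases h
  · intro used x rest hx ih y hy
    rw [bfsLoop, dif_pos hx]
    apply ih
    rcases hy with h | h
    · exact Or.inl h
    · rcases List.mem_cons.mp h with rfl | h
      · exact Or.inl ((PySem.Set.contains_iff _ _).mp hx)
      · exact Or.inr h
  · intro used x rest hx p hm ih y hy
    rw [bfsLoop, dif_neg hx]
    split
    next p' heq =>
      rw [heq] at hm; cases hm
      apply ih
      rcases hy with h | h
      · exact Or.inl (by rw [PySem.Set.mem_add]; exact Or.inl h)
      · rcases List.mem_cons.mp h with rfl | h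
        · exact Or.inl (by rw [PySem.Set.mem_add]; exact Or.inr rfl)
        · exact Or.inr (by simp [h])
    next heq => rw [heq] at hm; cases hm
  · intro used x rest hx hm ih y hy
    rw [bfsLoop, dif_neg hx]
    split
    next p' heq => rw [heq] at hm; cases hm
    next heq =>
      apply ih
      rcases hy with h | h
      · exact Or.inl (by rw [PySem.Set.mem_add]; exact Or.inl h)
      · rcases List.mem_cons.mp h with rfl | h
        · exact Or.inl (by rw [PySem.Set.mem_add]; exact Or.inr rfl)
        · exact Or.inr h

theorem bfs_sound (seed : Int) (m : PySem.Dict Int (Int × Int)) (used0 : PySem.Set Int)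
    (frontier0 : List Int) :
    (∀ y ∈ used0, Cl m seed y) → (∀ y ∈ frontier0, Cl m seed y) →
    ∀ y ∈ bfsLoop m used0 frontier0, Cl m seed y := by
  refine bfsLoop.induct m
    (fun used frontier => (∀ y ∈ used, Cl m seed y) → (∀ y ∈ frontier, Cl m seed y) →
      ∀ y ∈ bfsLoop m used frontier, Cl m seed y)
    ?_ ?_ ?_ ?_ used0 frontier0
  · intro used hu _; rw [bfsLoop]; exact hu
  · intro used x rest hx ih hu hf
    rw [bfsLoop, dif_pos hx]
    exact ih hu (fun y hy => hf y (List.mem_cons_of_mem _ hy))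
  · intro used x rest hx p hm ih hu hf
    rw [bfsLoop, dif_neg hx]
    split
    next p' heq =>
      rw [heq] at hm; cases hm
      have hclx : Cl m seed x := hf x List.mem_cons_self
      apply ih
      · intro y hy
        rw [PySem.Set.mem_add] at hy
        rcases hy with h | rfl
        · exact hu y h
        · exact hclx
      · intro y hy
        rcases List.mem_cons.mp hy with rfl | hy
        · exact Cl.right hclx heq
        · rcases List.mem_cons.mp hy with rfl | hy
          · exact Cl.left hclx heq
          · exact hf y (List.mem_cons_of_mem _ hy)
    next heq => rw [heq] at hm; cases hm
  · intro used x rest hx hm ih hu hf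
    rw [bfsLoop, dif_neg hx]
    split
    next p' heq => rw [heq] at hm; cases hm
    next heq =>
      have hclx : Cl m seed x := hf x List.mem_cons_self
      apply ih
      · intro y hy
        rw [PySem.Set.mem_add] at hy
        rcases hy with h | rfl
        · exact hu y h
        · exact hclx
      · exact fun y hy => hf y (List.mem_cons_of_mem _ hy)

theorem bfs_closed (m : PySem.Dict Int (Int × Int)) (used0 : PySem.Set Int) (frontier0 : List Int) :
    (∀ x ∈ used0, ∀ p : Int × Int, m.get? x = some p →
      (p.1 ∈ used0 ∨ p.1 ∈ frontier0) ∧ (p.2 ∈ used0 ∨ p.2 ∈ frontier0)) →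
    ∀ y ∈ bfsLoop m used0 frontier0, ∀ p : Int × Int, m.get? y = some p →
      p.1 ∈ bfsLoop m used0 frontier0 ∧ p.2 ∈ bfsLoop m used0 frontier0 := by
  refine bfsLoop.induct m
    (fun used frontier => (∀ x ∈ used, ∀ p : Int × Int, m.get? x = some p →
        (p.1 ∈ used ∨ p.1 ∈ frontier) ∧ (p.2 ∈ used ∨ p.2 ∈ frontier)) →
      ∀ y ∈ bfsLoop m used frontier, ∀ p : Int × Int, m.get? y = some p →
        p.1 ∈ bfsLoop m used frontier ∧ p.2 ∈ bfsLoop m used frontier)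
    ?_ ?_ ?_ ?_ used0 frontier0
  · intro used hinv
    rw [bfsLoop]
    intro y hy p hp
    have := hinv y hy p hp
    constructor
    · rcases this.1 with h | h; exact h; cases h
    · rcases this.2 with h | h; exact h; cases h
  · intro used x rest hx ih hinv
    rw [bfsLoop, dif_pos hx]
    apply ih
    intro x' hx' p hp
    have hxu : x ∈ used := (PySem.Set.contains_iff _ _).mp hx
    have := hinv x' hx' p hp
    constructor
    · rcases this.1 with h | h
      · exact Or.inl h
      · rcases List.mem_cons.mp h with rfl | h
        · exact Or.inl hxu
        · exact Or.inr h
    · rcases this.2 with h | h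
      · exact Or.inl h
      · rcases List.mem_cons.mp h with rfl | h
        · exact Or.inl hxu
        · exact Or.inr h
  · intro used x rest hx p hm ih hinv
    rw [bfsLoop, dif_neg hx]
    split
    next p' heq =>
      rw [heq] at hm; cases hm
      apply ih
      intro x' hx' q hq
      rw [PySem.Set.mem_add] at hx'
      rcases hx' with hx' | rfl
      · have := hinv x' hx' q hq
        constructor
        · rcases this.1 with h | h
          · exact Or.inl (by rw [PySem.Set.mem_add]; exact Or.inl h)
          · rcases List.mem_cons.mp h with rfl | h
            · exact Or.inl (by rw [PySem.Set.mem_add]; exact Or.inr rfl)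
            · exact Or.inr (by simp [h])
        · rcases this.2 with h | h
          · exact Or.inl (by rw [PySem.Set.mem_add]; exact Or.inl h)
          · rcases List.mem_cons.mp h with rfl | h
            · exact Or.inl (by rw [PySem.Set.mem_add]; exact Or.inr rfl)
            · exact Or.inr (by simp [h])
      · rw [heq] at hq
        cases hq
        exact ⟨Or.inr (by simp), Or.inr (by simp)⟩
    next heq => rw [heq] at hm; cases hm
  · intro used x rest hx hm ih hinv
    rw [bfsLoop, dif_neg hx]
    split
    next p' heq => rw [heq] at hm; cases hm
    next heq =>
      apply ih
      intro x' hx' q hq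
      rw [PySem.Set.mem_add] at hx'
      rcases hx' with hx' | rfl
      · have := hinv x' hx' q hq
        constructor
        · rcases this.1 with h | h
          · exact Or.inl (by rw [PySem.Set.mem_add]; exact Or.inl h)
          · rcases List.mem_cons.mp h with rfl | h
            · exact Or.inl (by rw [PySem.Set.mem_add]; exact Or.inr rfl)
            · exact Or.inr h
        · rcases this.2 with h | h
          · exact Or.inl (by rw [PySem.Set.mem_add]; exact Or.inl h)
          · rcases List.mem_cons.mp h with rfl | h
            · exact Or.inl (by rw [PySem.Set.mem_add]; exact Or.inr rfl)
            · exact Or.inr h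
      · rw [heq] at hq; cases hq

theorem cl_subset_bfs (m : PySem.Dict Int (Int × Int)) (seed : Int) :
    ∀ y, Cl m seed y → y ∈ bfsLoop m PySem.Set.empty [seed] := by
  intro y hy
  induction hy with
  | base => exact bfs_superset m _ _ seed (Or.inr (by simp))
  | left hx hm ih =>
    exact (bfs_closed m PySem.Set.empty [seed] (by intro x hx'; cases hx') _ ih _ hm).1
  | right hx hm ih =>
    exact (bfs_closed m PySem.Set.empty [seed] (by intro x hx'; cases hx') _ ih _ hm).2

-- ---- the parent map ----
theorem get?_foldl_insert_of_not_key (t : List ((Int × Int) × Int × List Int))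
    (d : PySem.Dict Int (Int × Int)) (x : Int) (hx : x ∉ t.map (fun s => s.2.1)) :
    (t.foldl (fun d s => d.insert s.2.1 s.1) d).get? x = d.get? x := by
  induction t generalizing d with
  | nil => rfl
  | cons a t ih =>
    simp only [List.map_cons, List.mem_cons, not_or] at hx
    rw [List.foldl_cons, ih _ (by exact fun h => hx.2 h),
      PySem.Dict.get?_insert_of_ne _ _ hx.1]

theorem get?_buildParents (t : List ((Int × Int) × Int × List Int))
    (hnd : (t.map (fun s => s.2.1)).Nodup) :
    ∀ s ∈ t, (buildParents t).get? s.2.1 = some s.1 := by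
  unfold buildParents
  suffices h : ∀ (d : PySem.Dict Int (Int × Int)), ∀ s ∈ t,
      (t.foldl (fun d s => d.insert s.2.1 s.1) d).get? s.2.1 = some s.1 from h _
  induction t with
  | nil => intro d s hs; cases hs
  | cons a t ih =>
    intro d s hs
    simp only [List.map_cons, List.nodup_cons] at hnd
    rcases List.mem_cons.mp hs with rfl | hs
    · rw [List.foldl_cons, get?_foldl_insert_of_not_key t _ _ hnd.1,
        PySem.Dict.get?_insert_self]
    · exact ih hnd.2 _ s hs

theorem buildParents_some (t : List ((Int × Int) × Int × List Int)) (x : Int) (p : Int × Int)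
    (h : (buildParents t).get? x = some p) : ∃ s ∈ t, s.2.1 = x ∧ s.1 = p := by
  unfold buildParents at h
  suffices hgen : ∀ (d : PySem.Dict Int (Int × Int)),
      (t.foldl (fun d s => d.insert s.2.1 s.1) d).get? x = some p →
      (∃ s ∈ t, s.2.1 = x ∧ s.1 = p) ∨ d.get? x = some p by
    rcases hgen PySem.Dict.empty h with h' | h'
    · exact h'
    · rw [PySem.Dict.get?_empty] at h'; cases h'
  clear h
  induction t with
  | nil => intro d h; exact Or.inr h
  | cons a t ih =>
    intro d h
    rw [List.foldl_cons] at h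
    rcases ih _ h with h' | h'
    · obtain ⟨s, hs, h1, h2⟩ := h'
      exact Or.inl ⟨s, List.mem_cons_of_mem _ hs, h1, h2⟩
    · by_cases hax : x = a.2.1
      · subst hax
        rw [PySem.Dict.get?_insert_self] at h'
        cases h'
        exact Or.inl ⟨a, List.mem_cons_self, rfl, rfl⟩
      · rw [PySem.Dict.get?_insert_of_ne _ _ hax] at h'
        exact Or.inr h'

-- ---- the reverse pass computes the same set ----
theorem mem_foldl_bStep_of_mem (l : List ((Int × Int) × Int × List Int)) (u : PySem.Set Int)
    (y : Int) (hy : y ∈ u) : y ∈ l.foldl bStep u := by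
  induction l generalizing u with
  | nil => exact hy
  | cons s l ih =>
    apply ih
    unfold bStep
    split_ifs
    · rw [PySem.Set.mem_add]; exact Or.inl (by rw [PySem.Set.mem_add]; exact Or.inl hy)
    · exact hy

theorem mem_foldl_bStep_new (l : List ((Int × Int) × Int × List Int)) (u : PySem.Set Int)
    (y : Int) (hy : y ∈ l.foldl bStep u) :
    y ∈ u ∨ ∃ s ∈ l, y = s.1.1 ∨ y = s.1.2 := by
  induction l generalizing u with
  | nil => exact Or.inl hy
  | cons s l ih =>
    rcases ih _ hy with h | h
    · unfold bStep at h
      split_ifs at h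
      · rw [PySem.Set.mem_add] at h
        rcases h with h | rfl
        · rw [PySem.Set.mem_add] at h
          rcases h with h | rfl
          · exact Or.inl h
          · exact Or.inr ⟨s, List.mem_cons_self, Or.inl rfl⟩
        · exact Or.inr ⟨s, List.mem_cons_self, Or.inr rfl⟩
      · exact Or.inl h
    · obtain ⟨a, ha, h'⟩ := h
      exact Or.inr ⟨a, List.mem_cons_of_mem _ ha, h'⟩

theorem rev_subset_cl (t : List ((Int × Int) × Int × List Int)) (seed : Int)
    (hnd : (t.map (fun s => s.2.1)).Nodup) :
    ∀ y ∈ t.reverse.foldl bStep (PySem.Set.ofList [seed]), Cl (buildParents t) seed y := by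
  have hkey := get?_buildParents t hnd
  suffices hgen : ∀ (l : List ((Int × Int) × Int × List Int)), (∀ s ∈ l, s ∈ t) →
      ∀ (u : PySem.Set Int), (∀ y ∈ u, Cl (buildParents t) seed y) →
      ∀ y ∈ l.foldl bStep u, Cl (buildParents t) seed y by
    apply hgen
    · exact fun s hs => List.mem_reverse.mp hs
    · intro y hy
      rw [PySem.Set.mem_ofList, List.mem_singleton] at hy
      subst hy; exact Cl.base
  intro l
  induction l with
  | nil => intro _ u hu y hy; exact hu y hy
  | cons s l ih =>
    intro hl u hu y hy
    rw [List.foldl_cons] at hy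
    refine ih (fun a ha => hl a (List.mem_cons_of_mem _ ha)) _ ?_ y hy
    intro z hz
    unfold bStep at hz
    split_ifs at hz with hc
    · have hcl : Cl (buildParents t) seed s.2.1 := hu _ ((PySem.Set.contains_iff _ _).mp hc)
      have hm := hkey s (hl s List.mem_cons_self)
      rw [PySem.Set.mem_add] at hz
      rcases hz with hz | rfl
      · rw [PySem.Set.mem_add] at hz
        rcases hz with hz | rfl
        · exact hu z hz
        · exact Cl.left hcl hm
      · exact Cl.right hcl hm
    · exact hu z hz

theorem cl_subset_rev (t : List ((Int × Int) × Int × List Int)) (seed : Int)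
    (hpw : t.Pairwise (fun a b => a.1.1 ≠ b.2.1 ∧ a.1.2 ≠ b.2.1)) :
    ∀ y, Cl (buildParents t) seed y → y ∈ t.reverse.foldl bStep (PySem.Set.ofList [seed]) := by
  intro y hy
  induction hy with
  | base => exact mem_foldl_bStep_of_mem _ _ _ (by simp [PySem.Set.mem_ofList])
  | @left x p hx hm ih =>
    obtain ⟨s, hs, hkey, hval⟩ := buildParents_some t x p hm
    obtain ⟨t1, t2, rfl⟩ := List.append_of_mem hs
    have hrev : (t1 ++ s :: t2).reverse = t2.reverse ++ s :: t1.reverse := by simp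
    rw [hrev, List.foldl_append, List.foldl_cons] at ih ⊢
    rcases mem_foldl_bStep_new _ _ _ ih with hxin | ⟨a, ha, hcase⟩
    · -- x is already present when s is processed
      set U2 := t2.reverse.foldl bStep (PySem.Set.ofList [seed]) with hU2
      unfold bStep at hxin ⊢
      by_cases hc : PySem.Set.contains U2 s.2.1 = true
      · rw [if_pos hc] at hxin ⊢
        apply mem_foldl_bStep_of_mem
        rw [PySem.Set.mem_add]
        exact Or.inl (by rw [PySem.Set.mem_add]; exact Or.inr (by rw [← hval]))
      · rw [if_neg hc] at hxin
        exact absurd ((PySem.Set.contains_iff _ _).mpr (hkey ▸ hxin)) hc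
    · -- impossible: an earlier step's parent equals s's result index
      exfalso
      rw [List.mem_reverse] at ha
      have hR := (List.pairwise_append.mp hpw).2.2 a ha s (List.mem_cons_self)
      rcases hcase with rfl | rfl
      · exact hR.1 hkey.symm
      · exact hR.2 hkey.symm
  | @right x p hx hm ih =>
    obtain ⟨s, hs, hkey, hval⟩ := buildParents_some t x p hm
    obtain ⟨t1, t2, rfl⟩ := List.append_of_mem hs
    have hrev : (t1 ++ s :: t2).reverse = t2.reverse ++ s :: t1.reverse := by simp
    rw [hrev, List.foldl_append, List.foldl_cons] at ih ⊢
    rcases mem_foldl_bStep_new _ _ _ ih with hxin | ⟨a, ha, hcase⟩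
    · set U2 := t2.reverse.foldl bStep (PySem.Set.ofList [seed]) with hU2
      unfold bStep at hxin ⊢
      by_cases hc : PySem.Set.contains U2 s.2.1 = true
      · rw [if_pos hc] at hxin ⊢
        apply mem_foldl_bStep_of_mem
        rw [PySem.Set.mem_add]
        exact Or.inr (by rw [← hval])
      · rw [if_neg hc] at hxin
        exact absurd ((PySem.Set.contains_iff _ _).mpr (hkey ▸ hxin)) hc
    · exfalso
      rw [List.mem_reverse] at ha
      have hR := (List.pairwise_append.mp hpw).2.2 a ha s (List.mem_cons_self)
      rcases hcase with rfl | rfl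
      · exact hR.1 hkey.symm
      · exact hR.2 hkey.symm

theorem filters_eq (t : List ((Int × Int) × Int × List Int)) (seed : Int)
    (hnd : (t.map (fun s => s.2.1)).Nodup)
    (hpw : t.Pairwise (fun a b => a.1.1 ≠ b.2.1 ∧ a.1.2 ≠ b.2.1)) :
    t.filter (fun r => PySem.Set.contains (t.reverse.foldl bStep (PySem.Set.ofList [seed])) r.2.1) =
      t.filter (fun s => PySem.Set.contains
        (bfsLoop (buildParents t) PySem.Set.empty [seed]) s.2.1) := by
  apply List.filter_congr
  intro x _
  have h1 : x.2.1 ∈ t.reverse.foldl bStep (PySem.Set.ofList [seed]) ↔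
      x.2.1 ∈ bfsLoop (buildParents t) PySem.Set.empty [seed] := by
    constructor
    · intro h; exact cl_subset_bfs _ seed _ (rev_subset_cl t seed hnd _ h)
    · intro h
      exact cl_subset_rev t seed hpw _ (bfs_sound seed _ _ _ (by intro y hy; cases hy) (by
        intro y hy; rw [List.mem_singleton] at hy; subst hy; exact Cl.base) _ h)
  by_cases hm : x.2.1 ∈ t.reverse.foldl bStep (PySem.Set.ofList [seed])
  · rw [(PySem.Set.contains_iff _ _).mpr hm, (PySem.Set.contains_iff _ _).mpr (h1.mp hm)]
  · rw [pv_contains_eq_false hm, pv_contains_eq_false (fun h => hm (h1.mpr h))]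

-- ---- scanB on the decomposed input ----
theorem scan_no_falsum (l : List ((Int × Int) × Int × List Int))
    (acc : List ((Int × Int) × Int × List Int))
    (h : ∀ r ∈ l, r.2.2 ≠ ([] : List Int)) : scanB acc l = acc.reverse ++ l := by
  induction l generalizing acc with
  | nil => simp [scanB]
  | cons x xs ih =>
    rw [scanB, if_neg (h x (by simp)), ih _ (fun r hr => h r (by simp [hr]))]
    simp

theorem scan_found (pre : List ((Int × Int) × Int × List Int)) (r : (Int × Int) × Int × List Int)
    (suf acc : List ((Int × Int) × Int × List Int))
    (hpre : ∀ s ∈ pre, s.2.2 ≠ ([] : List Int)) (hr : r.2.2 = ([] : List Int)) :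
    scanB acc (pre ++ r :: suf) =
      (acc.reverse ++ (pre ++ [r])).filter (fun s => PySem.Set.contains
        (bfsLoop (buildParents (acc.reverse ++ (pre ++ [r]))) PySem.Set.empty [r.2.1]) s.2.1) := by
  induction pre generalizing acc with
  | nil => rw [List.nil_append, scanB, if_pos hr]; simp
  | cons p ps ih =>
    rw [List.cons_append, scanB, if_neg (hpre p (by simp)),
      ih _ (fun s hs => hpre s (by simp [hs]))]
    simp

theorem takeWhile_found (pre suf : List ((Int × Int) × Int × List Int))
    (r : (Int × Int) × Int × List Int)
    (hpre : ∀ s ∈ pre, s.2.2 ≠ ([] : List Int)) (hr : r.2.2 = ([] : List Int)) :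
    (pre ++ r :: suf).takeWhile (fun x => !x.2.2.isEmpty) = pre := by
  induction pre with
  | nil => simp [hr]
  | cons a pre ih =>
    have ha : (!a.2.2.isEmpty) = true := by
      have := hpre a (by simp)
      cases h2 : a.2.2 with
      | nil => exact absurd h2 this
      | cons _ _ => simp
    rw [List.cons_append, List.takeWhile_cons, ha, if_pos rfl,
      ih (fun s hs => hpre s (by simp [hs]))]

-- ===== VERDICT (by name: the statement is the Claim_ definition above) =====
theorem reduce_res_tree_spec : Claim_equal_reduce_res_tree := by
  intro l hdom hpre
  unfold Spec_reduce_res_tree reduce_res_tree reduce_res_tree_alt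
  cases h : PySem.List.index? (l.map (fun r => r.2.2)) ([] : List Int) with
  | none =>
    simp only [h]
    have h' := Iff.mp (PySem.List.index?_eq_none_iff _ _) h
    rw [scan_no_falsum l [] (by intro r hr hc; exact h' (hc ▸ List.mem_map_of_mem hr))]
    simp
  | some i =>
    simp only [h]
    rw [PySem.List.index?_eq_some_iff] at h
    obtain ⟨preM, sufM, hmap, hlen, hnot⟩ := h
    obtain ⟨pre, rest, rfl, hp, hrest⟩ := List.map_eq_append_iff.mp hmap
    obtain ⟨r, suf, rfl, hr, hs⟩ := List.map_eq_cons_iff.mp hrest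
    have hpre' : ∀ s ∈ pre, s.2.2 ≠ ([] : List Int) := by
      intro s hs' hc
      exact hnot (by rw [← hp]; exact hc ▸ List.mem_map_of_mem hs')
    have hi : (i : Int) + 1 = ((pre.length + 1 : ℕ) : Int) := by
      rw [← hlen, ← hp, List.length_map]; push_cast; ring
    have hslice : PySem.List.slice (pre ++ r :: suf) none (some ((i : Int) + 1)) = pre ++ [r] := by
      rw [hi, PySem.List.slice_to_natCast, List.take_append]
      simp
    have htw : ((pre ++ r :: suf).takeWhile (fun x => !x.2.2.isEmpty)) = pre :=
      takeWhile_found pre suf r hpre' hr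
    have htake : (pre ++ r :: suf).take (pre.length + 1) = pre ++ [r] := by
      rw [List.take_append]; simp
    unfold Pre_reduce_res_tree at hpre
    rw [htw] at hpre
    have hlen2 : pre.length < (pre ++ r :: suf).length := by simp
    obtain ⟨hnd, hpw⟩ := hpre hlen2
    rw [htake] at hnd hpw
    rw [hslice, scan_found pre r suf [] hpre' hr, PySem.List.pyGetD_neg_one_append_singleton]
    simp only [List.reverse_nil, List.nil_append]
    exact (core_eq (pre ++ [r]) r.2.1).trans (filters_eq (pre ++ [r]) r.2.1 hnd hpw)
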